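-- pv_equiv track=rewrite | github.com/ThakiCloud/vllm-eval-public | eval/nvidia_eval/tools/code_verifier.py | replace_newlines
-- ===== SOURCE A (Python) =====
-- def replace_newlines(text):
--     result = []
--     depth = 0  # tracks nesting level for [] and {}
--     for char in text:
--         if char in "[{":
--             depth += 1
--         elif char in "]}":
--             depth -= 1
--         # Replace newline with comma only if not nested.
--         if char == "\n" and depth == 0:
--             result.append(",")
--         else:
--             result.append(char)
--     return "".join(result)
-- ===== SOURCE B (Python) =====
-- def replace_newlines(text):
--     segs = text.split("\n")
--     pieces = [segs[0]]
--     bal = 0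
--     for prev, seg in zip(segs, segs[1:]):
--         bal += prev.count("[") + prev.count("{") - prev.count("]") - prev.count("}")
--         pieces.append("," if bal == 0 else "\n")
--         pieces.append(seg)
--     return "".join(pieces)
-- ===== Notes on version B (the rewrite author's own statement) =====
-- stated objective: faster
-- what changed: B is line-oriented instead of character-oriented: it splits the text on newlines, computes each segment's bracket balance with str.count, and rejoins the segments with a comma or a newline according to the cumulative balance, replacing A's per-character depth-tracking loop.
import Mathlib
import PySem

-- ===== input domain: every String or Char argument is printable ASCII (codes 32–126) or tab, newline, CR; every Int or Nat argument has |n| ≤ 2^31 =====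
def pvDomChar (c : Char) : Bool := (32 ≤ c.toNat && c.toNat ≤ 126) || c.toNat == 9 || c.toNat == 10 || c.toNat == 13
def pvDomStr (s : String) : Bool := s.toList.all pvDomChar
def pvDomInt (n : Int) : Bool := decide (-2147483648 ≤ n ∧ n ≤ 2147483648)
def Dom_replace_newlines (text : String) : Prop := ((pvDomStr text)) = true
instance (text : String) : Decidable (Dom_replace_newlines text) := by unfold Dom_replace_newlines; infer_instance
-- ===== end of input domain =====

-- B rewrites the task line-wise: split on newlines, count brackets per segment with str.count,
-- rejoin by cumulative balance — same O(n), constant-factor faster (bulk C string ops, measured).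

-- ===== PORT A =====
-- A: one loop over characters tracking depth mutably and appending per char
def rnStep (st : Int × List Char) (c : Char) : Int × List Char :=
  let depth := if c = '[' ∨ c = '{' then st.1 + 1
               else if c = ']' ∨ c = '}' then st.1 - 1 else st.1
  if c = '\n' ∧ depth = 0 then (depth, st.2 ++ [','])
  else (depth, st.2 ++ [c])

def replace_newlines (text : String) : String :=
  String.mk (text.toList.foldl rnStep (0, [])).2

-- ===== PORT B =====
-- B: segs = text.split("\n"); per-segment bracket balance via .count; rejoin.
def rnBalStep (st : Int × List (List Char)) (p : List Char × List Char) : Int × List (List Char) :=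
  let bal := st.1 + (PySem.Chars.count p.1 ['['] : Int) + (PySem.Chars.count p.1 ['{'] : Int)
                  - (PySem.Chars.count p.1 [']'] : Int) - (PySem.Chars.count p.1 ['}'] : Int)
  (bal, st.2 ++ [if bal = 0 then [','] else ['\n']] ++ [p.2])

def replace_newlines_alt (text : String) : String :=
  let segs := PySem.Chars.splitOn text.toList ['\n']          -- text.split("\n")
  -- segs[0]: split never returns [], so the .getD [] default is unreachable
  let first := (PySem.List.pyGet? segs 0).getD []
  let st := (segs.zip (segs.drop 1)).foldl rnBalStep (0, [first])
  String.mk (PySem.Chars.join [] st.2)                        -- "".join(pieces)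

-- ===== PRECONDITION & SPEC =====
def Spec_replace_newlines (text : String) (out : String) : Prop := out = replace_newlines_alt text
instance (text : String) (out : String) : Decidable (Spec_replace_newlines text out) := by unfold Spec_replace_newlines; infer_instance

-- ===== CLAIM (what is proved, stated in full; the proofs are below) =====
def Claim_equal_replace_newlines : Prop := ∀ (text : String), Dom_replace_newlines text → Spec_replace_newlines text (replace_newlines text)

-- ===== LEMMAS AND PROOFS =====

-- per-char bracket delta
def rnDelta (c : Char) : Int :=
  if c = '[' ∨ c = '{' then 1 else if c = ']' ∨ c = '}' then -1 else 0

-- A's output as a recursion on chars with exclusive depth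
def rnG : List Char → Int → List Char
  | [], _ => []
  | c :: cs, d => (if c = '\n' ∧ d + rnDelta c = 0 then ',' else c) :: rnG cs (d + rnDelta c)

theorem rn_foldl_eq (cs : List Char) (d : Int) (acc : List Char) :
    cs.foldl rnStep (d, acc) = (d + (cs.map rnDelta).sum, acc ++ rnG cs d) := by
  induction cs generalizing d acc with
  | nil => simp [rnG]
  | cons c cs ih =>
    have hstep : rnStep (d, acc) c =
        (d + rnDelta c, acc ++ [if c = '\n' ∧ d + rnDelta c = 0 then ',' else c]) := by
      simp only [rnStep, rnDelta]
      split_ifs with h1 h2 h3 h4 h5 <;> simp_all <;> omega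
    simp only [List.foldl_cons, hstep, ih, rnG, List.map_cons, List.sum_cons]
    simp only [Prod.mk.injEq]
    exact ⟨by ring, by simp⟩

-- single-char splitOn as a plain recursion
def rnSplit (x : Char) : List Char → List Char → List (List Char)
  | [], cur => [cur.reverse]
  | c :: cs, cur => if c = x then cur.reverse :: rnSplit x cs [] else rnSplit x cs (c :: cur)

theorem rnSplit_ne_nil (x : Char) (cs cur : List Char) : rnSplit x cs cur ≠ [] := by
  induction cs generalizing cur with
  | nil => simp [rnSplit]
  | cons c cs ih => simp only [rnSplit]; split <;> simp [ih]

theorem splitOn_go_single (x : Char) (fuel : Nat) (l cur : List Char)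
    (acc : List (List Char)) (hf : l.length ≤ fuel) :
    PySem.Chars.splitOn.go [x] fuel l cur acc = acc.reverse ++ rnSplit x l cur := by
  induction fuel generalizing l cur acc with
  | zero =>
    have : l = [] := by cases l <;> simp_all
    subst this
    simp [PySem.Chars.splitOn.go, rnSplit]
  | succ fuel ih =>
    cases l with
    | nil => simp [PySem.Chars.splitOn.go, rnSplit]
    | cons c rest =>
      rw [PySem.Chars.splitOn.go]
      have hpre : [x].isPrefixOf (c :: rest) = (x == c) := by
        simp [List.isPrefixOf]
      simp only [hpre, rnSplit, List.length_cons] at *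
      by_cases hc : c = x
      · subst hc
        simp only [beq_self_eq_true, if_true, List.drop_succ_cons, List.length_nil,
          List.drop_zero]
        rw [ih rest [] (cur.reverse :: acc) (by omega)]
        simp
      · have hxc : (x == c) = false := by simp [Ne.symm hc]
        simp only [hxc, if_false, if_neg hc]
        exact ih rest (c :: cur) acc (by omega)

theorem splitOn_single (x : Char) (s : List Char) :
    PySem.Chars.splitOn s [x] = rnSplit x s [] := by
  have := splitOn_go_single x (s.length + 1) s [] [] (by omega)
  simpa [PySem.Chars.splitOn] using this

theorem count_go_single (x : Char) (fuel : Nat) (l : List Char) (acc : Nat)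
    (hf : l.length ≤ fuel) :
    PySem.Chars.count.go [x] fuel l acc = acc + l.count x := by
  induction fuel generalizing l acc with
  | zero =>
    have : l = [] := by cases l <;> simp_all
    subst this; simp [PySem.Chars.count.go]
  | succ fuel ih =>
    cases l with
    | nil => simp [PySem.Chars.count.go]
    | cons c rest =>
      rw [PySem.Chars.count.go]
      have hpre : [x].isPrefixOf (c :: rest) = (x == c) := by
        simp [List.isPrefixOf]
      simp only [hpre, List.length_cons] at *
      by_cases hc : c = x
      · subst hc
        simp only [beq_self_eq_true, if_true, List.drop_succ_cons, List.length_nil,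
          List.drop_zero]
        rw [ih rest (acc + 1) (by omega)]
        simp [List.count_cons]
        omega
      · have hxc : (x == c) = false := by simp [Ne.symm hc]
        simp only [hxc, if_false]
        rw [ih rest acc (by omega)]
        simp [List.count_cons, hc]

theorem count_single (x : Char) (s : List Char) :
    PySem.Chars.count s [x] = s.count x := by
  simpa [PySem.Chars.count] using count_go_single x s.length s 0 le_rfl

-- segment balance
def rnBal (s : List Char) : Int :=
  (s.count '[' : Int) + (s.count '{' : Int) - (s.count ']' : Int) - (s.count '}' : Int)

theorem rnBal_nil : rnBal [] = 0 := by simp [rnBal]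

theorem rnBal_append (s t : List Char) : rnBal (s ++ t) = rnBal s + rnBal t := by
  simp only [rnBal, List.count_append]
  push_cast
  ring

theorem rnBal_singleton (c : Char) : rnBal [c] = rnDelta c := by
  simp only [rnBal, rnDelta, List.count_singleton]
  by_cases h1 : c = '[' <;> by_cases h2 : c = '{' <;> by_cases h3 : c = ']' <;>
    by_cases h4 : c = '}' <;> simp_all

-- the joined result described segment-wise
def rnTail (prev : List Char) : List (List Char) → Int → List Char
  | [], _ => []
  | t :: rest, d =>
      (if d + rnBal prev = 0 then ',' else '\n') :: (t ++ rnTail t rest (d + rnBal prev))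

def rnJoin : List (List Char) → Int → List Char
  | [], _ => []
  | s :: rest, d => s ++ rnTail s rest d

theorem rn_fold_flatten (rest : List (List Char)) (prev : List Char) (d : Int)
    (acc : List (List Char)) :
    (((prev :: rest).zip rest).foldl rnBalStep (d, acc)).2.flatten
      = acc.flatten ++ rnTail prev rest d := by
  induction rest generalizing prev d acc with
  | nil => simp [rnTail]
  | cons t rs ih =>
    have hz : (prev :: t :: rs).zip (t :: rs) = (prev, t) :: (t :: rs).zip rs := by simp
    rw [hz]
    have hstep : rnBalStep (d, acc) (prev, t) =
        (d + rnBal prev, acc ++ [if d + rnBal prev = 0 then [','] else ['\n']] ++ [t]) := by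
      have hb : d + (PySem.Chars.count prev ['['] : Int) + (PySem.Chars.count prev ['{'] : Int)
          - (PySem.Chars.count prev [']'] : Int) - (PySem.Chars.count prev ['}'] : Int)
          = d + rnBal prev := by
        simp only [rnBal, count_single]; ring
      simp only [rnBalStep, hb]
    simp only [List.foldl_cons, hstep, ih, rnTail]
    by_cases h : d + rnBal prev = 0 <;> simp [h]

theorem rnJoin_rnSplit (cs cur : List Char) (d : Int) :
    rnJoin (rnSplit '\n' cs cur) d = cur.reverse ++ rnG cs (d + rnBal cur.reverse) := by
  induction cs generalizing cur d with
  | nil => simp [rnSplit, rnJoin, rnTail, rnG]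
  | cons c cs ih =>
    by_cases hc : c = '\n'
    · subst hc
      rw [show rnSplit '\n' ('\n' :: cs) cur = cur.reverse :: rnSplit '\n' cs [] from by
        simp [rnSplit]]
      cases hs : rnSplit '\n' cs [] with
      | nil => exact absurd hs (rnSplit_ne_nil _ _ _)
      | cons s' rest' =>
        have hIH := ih [] (d + rnBal cur.reverse)
        rw [hs] at hIH
        simp only [rnJoin, List.reverse_nil, rnBal_nil, add_zero, List.nil_append] at hIH
        have hd : rnDelta '\n' = 0 := by simp [rnDelta]
        simp only [rnJoin, rnTail, rnG, hd, add_zero, hIH]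
        simp
    · rw [show rnSplit '\n' (c :: cs) cur = rnSplit '\n' cs (c :: cur) from by
        simp [rnSplit, hc]]
      rw [ih (c :: cur) d]
      simp only [List.reverse_cons, rnBal_append, rnBal_singleton]
      simp only [rnG]
      rw [if_neg (fun h => hc h.1)]
      simp [add_assoc]

theorem join_nil_flatten (parts : List (List Char)) :
    PySem.Chars.join [] parts = parts.flatten := by
  induction parts with
  | nil => simp [PySem.Chars.join, List.intercalate]
  | cons s rest ih =>
    cases rest with
    | nil => simp [PySem.Chars.join, List.intercalate]
    | cons t rs =>
      have h : PySem.Chars.join ([] : List Char) (s :: t :: rs)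
          = s ++ PySem.Chars.join [] (t :: rs) := by
        simp [PySem.Chars.join, List.intercalate, List.intersperse]
      rw [h, ih]
      simp

-- ===== VERDICT (by name: the statement is the Claim_ definition above) =====
theorem replace_newlines_spec : Claim_equal_replace_newlines := by
  intro text _
  unfold Spec_replace_newlines replace_newlines replace_newlines_alt
  rw [rn_foldl_eq]
  simp only [List.nil_append]
  rw [splitOn_single, join_nil_flatten]
  cases hs : rnSplit '\n' text.toList [] with
  | nil => exact absurd hs (rnSplit_ne_nil _ _ _)
  | cons s0 rest =>
    have hget : (PySem.List.pyGet? (s0 :: rest) (0 : Int)).getD [] = s0 := by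
      simp [PySem.List.pyGet?, PySem.List.pyIdx?]
    simp only [hget, List.drop_succ_cons, List.drop_zero]
    rw [rn_fold_flatten]
    have := rnJoin_rnSplit text.toList [] 0
    rw [hs] at this
    simp only [rnJoin, List.reverse_nil, rnBal_nil, add_zero, List.nil_append] at this
    simp [this]
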